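-- pv_equiv track=rewrite | github.com/neilneil2000/Advent-of-Code-2020 | Day6/Day6.py | calculate_all_yes
-- ===== SOURCE A (Python) =====
-- def calculate_all_yes(groups):
--     group_values = []
--     for group in groups:
--         values = set(group[0])
--         if len(group) > 1:
--             for i in range(1,len(group)):
--                 values.intersection_update(group[i])
--         group_values.append(values)
--     return group_values
-- ===== SOURCE B (Python) =====
-- def calculate_all_yes(groups):
--     group_values = []
--     for group in groups:
--         counts = {}
--         for member in group:
--             for ch in set(member):
--                 counts[ch] = counts.get(ch, 0) + 1
--         group_values.append({ch for ch in set(group[0]) if counts[ch] == len(group)})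
--     return group_values
-- ===== Notes on version B (the rewrite author's own statement) =====
-- stated objective: alternative
-- what changed: Per group, A starts from the first member's character set and repeatedly intersects it with each further member; B instead makes one counting pass that tallies each member's distinct characters in a dict and keeps the characters whose count equals the group size.
import Mathlib
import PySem

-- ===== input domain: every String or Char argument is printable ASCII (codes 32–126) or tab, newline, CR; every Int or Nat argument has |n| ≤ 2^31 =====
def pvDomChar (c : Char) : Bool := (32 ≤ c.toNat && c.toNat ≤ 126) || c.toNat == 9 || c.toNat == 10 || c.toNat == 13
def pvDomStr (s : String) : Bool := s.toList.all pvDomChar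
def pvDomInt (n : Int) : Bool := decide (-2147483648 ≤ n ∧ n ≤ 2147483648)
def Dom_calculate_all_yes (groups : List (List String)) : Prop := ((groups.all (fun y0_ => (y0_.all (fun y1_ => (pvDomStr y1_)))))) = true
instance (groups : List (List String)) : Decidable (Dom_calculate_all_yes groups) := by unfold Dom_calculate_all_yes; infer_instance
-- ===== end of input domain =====

-- B replaces A's per-group "start from the first member's char set, intersect with each
-- further member" loop by a single frequency count over each member's distinct characters,
-- keeping the characters whose count equals the group size (objective: alternative).


-- iterating a Python string yields its characters as 1-char strings (used by both ports)
def pvCharsOf (s : String) : List String := s.toList.map (fun c => String.singleton c)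

-- ===== PORT A =====
def calculate_all_yes (groups : List (List String)) : List (List String) :=
  groups.foldl (fun group_values group =>
    let values : PySem.Set String :=
      PySem.Set.ofList (pvCharsOf (PySem.List.pyGetD group 0 ""))
    let values :=
      if 1 < group.length then
        (PySem.List.pyRange 1 (group.length : Int) 1).foldl
          (fun v i => PySem.Set.inter v (pvCharsOf (PySem.List.pyGetD group i "")))
          values
      else values
    group_values ++ [values]) []

-- ===== PORT B =====
def calculate_all_yes_alt (groups : List (List String)) : List (List String) :=
  groups.map (fun group =>
    let counts : PySem.Dict String Int :=
      group.foldl (fun d member =>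
        (PySem.Set.ofList (pvCharsOf member)).foldl
          (fun d ch => d.modify ch 0 (· + 1)) d)
        PySem.Dict.empty
    PySem.Set.ofList
      ((PySem.Set.ofList (pvCharsOf (PySem.List.pyGetD group 0 ""))).filter
        (fun ch => counts.getD ch 0 == (group.length : Int))))

-- ===== PRECONDITION & SPEC =====
-- Pre_ excludes inputs containing an empty group, on which A raises IndexError at group[0].
def Pre_calculate_all_yes (groups : List (List String)) : Prop :=
  ∀ g ∈ groups, g ≠ []
instance (groups : List (List String)) : Decidable (Pre_calculate_all_yes groups) := by
  unfold Pre_calculate_all_yes; infer_instance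
def pvWitness_calculate_all_yes : List (List String) := [["ab", "b"], ["xy"]]

def Spec_calculate_all_yes (groups : List (List String)) (out : List (List String)) : Prop :=
  out = calculate_all_yes_alt groups
instance (groups : List (List String)) (out : List (List String)) : Decidable (Spec_calculate_all_yes groups out) := by
  unfold Spec_calculate_all_yes; infer_instance

-- ===== CLAIM (what is proved, stated in full; the proofs are below) =====
def Claim_equal_calculate_all_yes : Prop := ∀ (groups : List (List String)), Dom_calculate_all_yes groups → Pre_calculate_all_yes groups → Spec_calculate_all_yes groups (calculate_all_yes groups)

-- ===== LEMMAS AND PROOFS =====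

-- proof-only abbreviation: the distinct characters of one member
def pvC (t : String) : List String := PySem.Set.ofList (pvCharsOf t)

-- A's intersection loop is a filter by membership in every remaining member.
theorem foldl_inter_eq_filter (rest : List String) :
    ∀ (acc : PySem.Set String),
      rest.foldl (fun v s => PySem.Set.inter v (pvCharsOf s)) acc =
        acc.filter (fun x => rest.all (fun s => (pvCharsOf s).contains x)) := by
  induction rest with
  | nil => intro acc; simp
  | cons s rest ih =>
    intro acc
    rw [List.foldl_cons, ih]
    show (PySem.Set.inter acc (pvCharsOf s)).filter _ = _
    simp only [PySem.Set.inter, List.filter_filter]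
    exact List.filter_congr (fun x _ => by
      simp [List.all_cons, Bool.and_comm, PySem.Set.contains_eq_listContains])

-- count of x in a concatenation of Nodup blocks is at most the number of blocks
theorem count_flatMap_le (x : String) (rest : List String) :
    (rest.flatMap pvC).count x ≤ rest.length := by
  induction rest with
  | nil => simp
  | cons s rest ih =>
    have h1 : (pvC s).count x ≤ 1 :=
      List.nodup_iff_count_le_one.mp (PySem.Set.nodup_ofList _) x
    simp only [List.flatMap_cons, List.count_append, List.length_cons]
    omega

-- ...and it equals the number of blocks exactly when x lies in every block
theorem count_flatMap_eq_iff (x : String) (rest : List String) :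
    (rest.flatMap pvC).count x = rest.length ↔ ∀ s ∈ rest, x ∈ pvC s := by
  induction rest with
  | nil => simp
  | cons s rest ih =>
    have hle := count_flatMap_le x rest
    simp only [List.flatMap_cons, List.count_append, List.length_cons, List.mem_cons]
    by_cases h : x ∈ pvC s
    · have h1 : (pvC s).count x = 1 :=
        List.count_eq_one_of_mem (PySem.Set.nodup_ofList _) h
      constructor
      · intro hc t ht
        rcases ht with rfl | ht
        · exact h
        · exact (ih.mp (by omega)) t ht
      · intro hall
        have := ih.mpr (fun t ht => hall t (Or.inr ht))
        omega
    · have h0 : (pvC s).count x = 0 := List.count_eq_zero.mpr h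
      constructor
      · intro hc; omega
      · intro hall; exact absurd (hall s (Or.inl rfl)) h

-- B's per-group computation, reduced to a filter of the first member's char set
theorem alt_group_eq (m : String) (rest : List String) :
    (PySem.Set.ofList
      ((PySem.Set.ofList (pvCharsOf m)).filter
        (fun ch => ((m :: rest).foldl (fun d member =>
            (PySem.Set.ofList (pvCharsOf member)).foldl
              (fun d ch => PySem.Dict.modify d ch 0 (· + 1)) d)
          PySem.Dict.empty).getD ch 0 == ((m :: rest).length : Int))) : List String) =
    (PySem.Set.ofList (pvCharsOf m)).filter
      (fun x => (((m :: rest).flatMap pvC).count x : Int) == ((m :: rest).length : Int)) := by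
  have hfold : ((m :: rest).foldl (fun d member =>
        (PySem.Set.ofList (pvCharsOf member)).foldl
          (fun d ch => PySem.Dict.modify d ch 0 (· + 1)) d)
      PySem.Dict.empty) = PySem.Dict.counter ((m :: rest).flatMap pvC) := by
    rw [PySem.Dict.counter_eq_foldl, List.foldl_flatMap]; rfl
  rw [hfold]
  rw [PySem.Set.ofList_eq_self_of_nodup _ ((PySem.Set.nodup_ofList _).filter _)]
  exact List.filter_congr (fun x _ => by rw [PySem.Dict.getD_counter])

-- the two per-group filters agree pointwise on the first member's char set
theorem group_agree (m : String) (rest : List String) :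
    (PySem.Set.ofList (pvCharsOf m)).filter
        (fun x => rest.all (fun s => (pvCharsOf s).contains x)) =
    (PySem.Set.ofList (pvCharsOf m)).filter
      (fun x => (((m :: rest).flatMap pvC).count x : Int) ==
        ((m :: rest).length : Int)) := by
  refine List.filter_congr (fun x hx => ?_)
  have hm : x ∈ pvC m := hx
  have h1 : (pvC m).count x = 1 := List.count_eq_one_of_mem (PySem.Set.nodup_ofList _) hm
  have hpred : (rest.all (fun s => (pvCharsOf s).contains x)) =
      decide (∀ s ∈ rest, x ∈ pvC s) := by
    rw [Bool.eq_iff_iff]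
    simp [pvC, PySem.Set.mem_ofList, List.all_eq_true]
  rw [hpred]
  simp only [List.flatMap_cons, List.count_append, h1, List.length_cons]
  by_cases hall : ∀ s ∈ rest, x ∈ pvC s
  · have heq : (rest.flatMap pvC).count x = rest.length := (count_flatMap_eq_iff x rest).mpr hall
    rw [heq]
    simp only [Nat.add_comm, beq_self_eq_true]
    exact decide_eq_true hall
  · have hne : (rest.flatMap pvC).count x ≠ rest.length :=
      fun h => hall ((count_flatMap_eq_iff x rest).mp h)
    have h2 : ((((1 + (rest.flatMap pvC).count x : Nat)) : Int) ==
        (((rest.length + 1 : Nat)) : Int)) = false := by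
      rw [beq_eq_false_iff_ne]
      intro h
      exact hne (by omega)
    rw [h2]
    simp [hall]

-- ===== VERDICT (by name: the statement is the Claim_ definition above) =====
theorem calculate_all_yes_spec : Claim_equal_calculate_all_yes := by
  intro groups _ hpre
  unfold Spec_calculate_all_yes calculate_all_yes calculate_all_yes_alt
  rw [PySem.List.foldl_append_singleton_eq_map, List.nil_append]
  refine List.map_congr_left (fun g hg => ?_)
  obtain ⟨m, rest, rfl⟩ := List.exists_cons_of_ne_nil (hpre g hg)
  have hget0 : PySem.List.pyGetD (m :: rest) 0 "" = m := by simp [PySem.List.pyGetD]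
  have hloop : (PySem.List.pyRange 1 ((m :: rest).length : Int) 1).foldl
      (fun v i => PySem.Set.inter v (pvCharsOf (PySem.List.pyGetD (m :: rest) i "")))
      (PySem.Set.ofList (pvCharsOf m)) =
      rest.foldl (fun v s => PySem.Set.inter v (pvCharsOf s))
        (PySem.Set.ofList (pvCharsOf m)) := by
    have := PySem.List.foldl_pyRange_pyGetD' (m :: rest) ""
      (fun v s => PySem.Set.inter v (pvCharsOf s))
      (PySem.Set.ofList (pvCharsOf m)) (a := 1) (by norm_num)
    simpa using this
  show (let values := PySem.Set.ofList (pvCharsOf (PySem.List.pyGetD (m :: rest) 0 ""));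
    let values := if 1 < (m :: rest).length then
        (PySem.List.pyRange 1 ((m :: rest).length : Int) 1).foldl
          (fun v i => PySem.Set.inter v (pvCharsOf (PySem.List.pyGetD (m :: rest) i ""))) values
      else values
    values) = _
  simp only [hget0]
  have hA : (if 1 < (m :: rest).length then
      (PySem.List.pyRange 1 ((m :: rest).length : Int) 1).foldl
        (fun v i => PySem.Set.inter v (pvCharsOf (PySem.List.pyGetD (m :: rest) i "")))
        (PySem.Set.ofList (pvCharsOf m))
      else PySem.Set.ofList (pvCharsOf m)) =
      rest.foldl (fun v s => PySem.Set.inter v (pvCharsOf s))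
        (PySem.Set.ofList (pvCharsOf m)) := by
    by_cases h : 1 < (m :: rest).length
    · rw [if_pos h, hloop]
    · have hnil : rest = [] := by
        cases rest with
        | nil => rfl
        | cons a t => simp at h
      subst hnil
      rw [if_neg h]; rfl
  rw [hA, foldl_inter_eq_filter, alt_group_eq m rest]
  exact group_agree m rest
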